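-- pv_equiv track=rewrite | github.com/IamMushroom/python.learn.advanced | Lesson 8/task_8.24.py | solution
-- ===== SOURCE A (Python) =====
-- def solution(array1: list[int], array2: list[int], array3: list[int]) -> set[int]:
--     result = set()
--     for number in array1:
--         if not(number in array2 and number in array3):
--             result.add(number)
--     for number in array2:
--         if not(number in array1 and number in array3):
--             result.add(number)
--     for number in array3:
--         if not(number in array2 and number in array1):
--             result.add(number)
--     return result
-- ===== SOURCE B (Python) =====
-- def solution(array1: list[int], array2: list[int], array3: list[int]) -> set[int]:
--     s1, s2, s3 = set(array1), set(array2), set(array3)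
--     return (s1 | s2 | s3) - (s1 & s2 & s3)
-- ===== Notes on version B (the rewrite author's own statement) =====
-- stated objective: simpler
-- what changed: replaced the three element-scanning loops with per-element list-membership tests by the set-algebra closed form (s1|s2|s3) - (s1&s2&s3)
import Mathlib
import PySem

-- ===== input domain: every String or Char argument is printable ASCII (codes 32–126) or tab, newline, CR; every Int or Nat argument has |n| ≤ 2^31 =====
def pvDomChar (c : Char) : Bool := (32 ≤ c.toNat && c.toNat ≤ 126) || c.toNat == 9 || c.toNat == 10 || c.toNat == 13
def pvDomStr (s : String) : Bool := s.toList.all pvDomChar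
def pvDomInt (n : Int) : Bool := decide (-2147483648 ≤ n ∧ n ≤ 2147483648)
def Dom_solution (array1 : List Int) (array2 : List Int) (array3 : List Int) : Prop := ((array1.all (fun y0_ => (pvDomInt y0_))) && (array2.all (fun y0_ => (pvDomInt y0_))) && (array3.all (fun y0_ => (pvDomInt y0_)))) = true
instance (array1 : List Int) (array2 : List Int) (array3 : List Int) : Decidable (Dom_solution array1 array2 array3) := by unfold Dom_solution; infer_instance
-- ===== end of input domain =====

-- B replaces A's three scanning loops by the set-algebra closed form (s1|s2|s3) - (s1&s2&s3); proved equal on all inputs.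


-- ===== PORT A =====
def solution (array1 : List Int) (array2 : List Int) (array3 : List Int) : List Int :=
  let result : PySem.Set Int := PySem.Set.empty
  let result := array1.foldl (fun result number =>
    if ¬(number ∈ array2 ∧ number ∈ array3) then PySem.Set.add result number else result) result
  let result := array2.foldl (fun result number =>
    if ¬(number ∈ array1 ∧ number ∈ array3) then PySem.Set.add result number else result) result
  let result := array3.foldl (fun result number =>
    if ¬(number ∈ array2 ∧ number ∈ array1) then PySem.Set.add result number else result) result
  result

-- ===== PORT B =====
def solution_alt (array1 : List Int) (array2 : List Int) (array3 : List Int) : List Int :=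
  let s1 : PySem.Set Int := PySem.Set.ofList array1
  let s2 : PySem.Set Int := PySem.Set.ofList array2
  let s3 : PySem.Set Int := PySem.Set.ofList array3
  PySem.Set.diff (PySem.Set.union (PySem.Set.union s1 s2) s3)
                 (PySem.Set.inter (PySem.Set.inter s1 s2) s3)

-- ===== PRECONDITION & SPEC =====
def Spec_solution (array1 : List Int) (array2 : List Int) (array3 : List Int) (out : List Int) : Prop := out = solution_alt array1 array2 array3
instance (array1 : List Int) (array2 : List Int) (array3 : List Int) (out : List Int) : Decidable (Spec_solution array1 array2 array3 out) := by unfold Spec_solution; infer_instance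

-- ===== CLAIM (what is proved, stated in full; the proofs are below) =====
def Claim_equal_solution : Prop := ∀ (array1 : List Int) (array2 : List Int) (array3 : List Int), Dom_solution array1 array2 array3 → Spec_solution array1 array2 array3 (solution array1 array2 array3)

-- ===== LEMMAS AND PROOFS =====

-- dedup and filter commute: set(filter(p, L)) lists the same elements in the same order as filtering set(L)
theorem ofList_filter_comm (p : Int → Bool) (L : List Int) :
    PySem.Set.ofList (L.filter p) = (PySem.Set.ofList L).filter p := by
  induction L with
  | nil => rfl
  | cons x xs ih =>
    by_cases hp : p x = true
    · rw [List.filter_cons_of_pos hp, PySem.Set.ofList_cons, PySem.Set.ofList_cons, ih,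
        List.filter_cons_of_pos hp, PySem.Set.discard, PySem.Set.discard,
        List.filter_filter, List.filter_filter]
      congr 1
      exact List.filter_congr (fun a _ => by rw [Bool.and_comm])
    · rw [List.filter_cons_of_neg hp, PySem.Set.ofList_cons,
        List.filter_cons_of_neg hp, PySem.Set.discard, List.filter_filter, ih]
      exact List.filter_congr (fun a _ => by
        by_cases hpa : p a = true
        · have : (a == x) = false := by
            rcases eq_or_ne a x with rfl | hne
            · exact absurd hpa hp
            · simp [hne]
          simp [this, hpa]
        · simp [Bool.eq_false_iff.mpr hpa])

theorem solution_eq_filter (array1 array2 array3 : List Int) :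
    solution array1 array2 array3 =
      (PySem.Set.ofList (array1 ++ array2 ++ array3)).filter
        (fun x => decide (¬(x ∈ array1 ∧ x ∈ array2 ∧ x ∈ array3))) := by
  set p : Int → Bool := fun x => decide (¬(x ∈ array1 ∧ x ∈ array2 ∧ x ∈ array3)) with hp
  show (List.foldl _ (List.foldl _ (List.foldl _ PySem.Set.empty array1) array2) array3) = _
  rw [PySem.List.foldl_ite_eq_foldl_filter, PySem.List.foldl_ite_eq_foldl_filter,
      PySem.List.foldl_ite_eq_foldl_filter]
  have h1 : array1.filter (fun x => decide (¬(x ∈ array2 ∧ x ∈ array3))) = array1.filter p := by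
    refine List.filter_congr (fun a ha => ?_)
    simp only [hp, decide_eq_decide]
    tauto
  have h2 : array2.filter (fun x => decide (¬(x ∈ array1 ∧ x ∈ array3))) = array2.filter p := by
    refine List.filter_congr (fun a ha => ?_)
    simp only [hp, decide_eq_decide]
    tauto
  have h3 : array3.filter (fun x => decide (¬(x ∈ array2 ∧ x ∈ array1))) = array3.filter p := by
    refine List.filter_congr (fun a ha => ?_)
    simp only [hp, decide_eq_decide]
    tauto
  rw [h1, h2, h3]
  show PySem.Set.update (PySem.Set.update (PySem.Set.update ([] : PySem.Set Int) _) _) _ = _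
  rw [← PySem.Set.update_append, ← PySem.Set.update_append, PySem.Set.update_nil_left,
      ← List.filter_append, ← List.filter_append, List.append_assoc, ofList_filter_comm]

theorem update_ofList (s : PySem.Set Int) (xs : List Int) :
    PySem.Set.update s (PySem.Set.ofList xs) = PySem.Set.update s xs := by
  rw [PySem.Set.update_eq_append_filter, PySem.Set.update_eq_append_filter, PySem.Set.ofList_ofList]

theorem solution_spec' (array1 array2 array3 : List Int) :
    solution array1 array2 array3 = solution_alt array1 array2 array3 := by
  rw [solution_eq_filter]
  show _ = PySem.Set.diff (PySem.Set.union (PySem.Set.union _ _) _) _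
  rw [PySem.Set.union, PySem.Set.union, update_ofList, update_ofList,
      ← PySem.Set.ofList_append, ← PySem.Set.ofList_append, PySem.Set.diff]
  refine List.filter_congr (fun a _ => ?_)
  have hmem : (PySem.Set.inter (PySem.Set.inter (PySem.Set.ofList array1) (PySem.Set.ofList array2)) (PySem.Set.ofList array3)).contains a = true ↔ (a ∈ array1 ∧ a ∈ array2 ∧ a ∈ array3) := by
    rw [PySem.Set.contains_iff, PySem.Set.mem_inter, PySem.Set.mem_inter,
        PySem.Set.mem_ofList, PySem.Set.mem_ofList, PySem.Set.mem_ofList]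
    tauto
  by_cases h : a ∈ array1 ∧ a ∈ array2 ∧ a ∈ array3
  · simp [h]
  · have : _ = false := Bool.eq_false_iff.mpr (fun hc => h (hmem.mp hc))
    simp only [this, Bool.not_false, decide_eq_true_eq]
    tauto

-- ===== VERDICT (by name: the statement is the Claim_ definition above) =====
theorem solution_spec : Claim_equal_solution := by
  intro a1 a2 a3 _
  show solution a1 a2 a3 = solution_alt a1 a2 a3
  exact solution_spec' a1 a2 a3
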